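-- pv_equiv track=rewrite | github.com/hoang010/graphEditor | src/graphReader.py | gen_path
-- ===== SOURCE A (Python) =====
-- def gen_path(path,src,dest):
--     #split the parts into different steps with | char
--     parts = path.split('|')
--     gen_path = 'at '
--     cur_dir = -100
--     last_marked = ""
--     #loop through all parts
--     for i in range(len(parts)):
--         #if it is the first part, means it is at the start of the sentence, add the source name
--         if i == 0:
--             gen_path += src + ' '
--         else:
--             # split the current part by >
--             direction, nxt = parts[i].split('>')
--             #remember the destination to be added back later if the direction has not changed
--             if cur_dir == direction:
--                 last_marked = nxt
--                 continue
--             else: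
--                 #if the direction changed and last marked is not empty then add the landmarks
--                 if last_marked:
--                     gen_path += last_marked + ' from there '
--             #-1 is turn left
--             #0 is go straight
--             #1 is turn right
--             #-2 is go down an elevator
--             #2 is go up an elevator
--             #3 or -3 are both go towards something in the line of sight
--             if direction == '1':
--                 gen_path += "turn right and go until you see "
--             elif direction == '-1':
--                 gen_path += "turn left and go until you see "
--             elif direction == '0':
--                 gen_path += "go straight until you see "
--             elif direction == '2':
--                 gen_path += "go up the elevator until "
--             elif direction == '-2':
--                 gen_path += "go down the elevator until "
--             elif direction == '3' or direction == '-3':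
--                 gen_path += "you will see "
--             last_marked = nxt
--             cur_dir = direction
--     gen_path += dest
--     return gen_path
-- ===== SOURCE B (Python) =====
-- from itertools import groupby
--
-- def _phrase(direction):
--     if direction == '1':
--         return "turn right and go until you see "
--     elif direction == '-1':
--         return "turn left and go until you see "
--     elif direction == '0':
--         return "go straight until you see "
--     elif direction == '2':
--         return "go up the elevator until "
--     elif direction == '-2':
--         return "go down the elevator until "
--     elif direction == '3' or direction == '-3':
--         return "you will see "
--     return ""
--
-- def gen_path(path, src, dest):
--     parts = path.split('|')
--     pairs = []
--     for part in parts[1:]: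
--         direction, nxt = part.split('>')
--         pairs.append((direction, nxt))
--     # runs of consecutive equal directions; keep only the LAST landmark of each run
--     runs = [(d, [n for _, n in grp][-1]) for d, grp in groupby(pairs, key=lambda p: p[0])]
--     out = 'at ' + src + ' '
--     prev_landmark = ''
--     for direction, landmark in runs:
--         if prev_landmark:
--             out += prev_landmark + ' from there '
--         out += _phrase(direction)
--         prev_landmark = landmark
--     return out + dest
-- ===== Notes on version B (the rewrite author's own statement) =====
-- stated objective: simpler
-- what changed: B first parses the steps into (direction, landmark) pairs and groups consecutive equal directions with itertools.groupby, rendering each run once from its last landmark, instead of A's single index loop threading cur_dir/last_marked state.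
import Mathlib
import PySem

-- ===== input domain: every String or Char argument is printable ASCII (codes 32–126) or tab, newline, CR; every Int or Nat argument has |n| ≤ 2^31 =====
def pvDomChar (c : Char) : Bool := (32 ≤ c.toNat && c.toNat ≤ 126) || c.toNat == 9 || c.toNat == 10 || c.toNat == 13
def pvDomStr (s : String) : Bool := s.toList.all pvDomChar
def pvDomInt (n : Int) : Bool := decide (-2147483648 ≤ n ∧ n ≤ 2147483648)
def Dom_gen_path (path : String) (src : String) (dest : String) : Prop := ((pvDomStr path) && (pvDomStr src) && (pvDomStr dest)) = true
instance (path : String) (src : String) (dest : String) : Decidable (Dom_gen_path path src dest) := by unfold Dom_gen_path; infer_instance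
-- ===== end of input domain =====

-- B groups the steps into runs of consecutive equal directions first (itertools.groupby) and
-- renders each run once from its last landmark, instead of A's single stateful index loop;
-- objective: simpler decomposition, same cost.

-- shared primitive wrapper: Python s.split(sep) for a non-empty sep
def pySplit (s sep : String) : List String := (PySem.Str.split? s sep).getD []

-- ===== PORT A =====
-- literal transliteration of A: one loop over range(len(parts)) with state
-- (gen_path, cur_dir, last_marked); cur_dir starts as the int -100, which can never equal a
-- string, so it is modelled as Option String starting at none.  'direction, nxt =
-- part.split('>')' raises unless the part has exactly one '>' (excluded by Pre_); the port
-- reads the first two pieces.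
def genStepBodyA (st : String × Option String × String) (part : String) :
    String × Option String × String :=
  let pcs := pySplit part ">"
  let direction := pcs.getD 0 ""
  let nxt := pcs.getD 1 ""
  if st.2.1 == some direction then (st.1, st.2.1, nxt)
  else
    let g := if st.2.2 ≠ "" then st.1 ++ st.2.2 ++ " from there " else st.1
    let g :=
      if direction == "1" then g ++ "turn right and go until you see "
      else if direction == "-1" then g ++ "turn left and go until you see "
      else if direction == "0" then g ++ "go straight until you see "
      else if direction == "2" then g ++ "go up the elevator until "
      else if direction == "-2" then g ++ "go down the elevator until "
      else if direction == "3" || direction == "-3" then g ++ "you will see "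
      else g
    (g, some direction, nxt)

def genStepA (src : String) (parts : List String)
    (st : String × Option String × String) (i : Int) : String × Option String × String :=
  if i == 0 then (st.1 ++ src ++ " ", st.2.1, st.2.2)
  else genStepBodyA st (PySem.List.pyGetD parts i "")

def gen_path (path : String) (src : String) (dest : String) : String :=
  ((PySem.List.pyRange 0 (((pySplit path "|").length : Int))).foldl
    (genStepA src (pySplit path "|")) ("at ", none, "")).1 ++ dest

-- ===== PORT B =====
def phraseB (direction : String) : String :=
  if direction == "1" then "turn right and go until you see "
  else if direction == "-1" then "turn left and go until you see "
  else if direction == "0" then "go straight until you see "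
  else if direction == "2" then "go up the elevator until "
  else if direction == "-2" then "go down the elevator until "
  else if direction == "3" || direction == "-3" then "you will see "
  else ""

def parsePairB (part : String) : String × String :=
  let pcs := pySplit part ">"
  (pcs.getD 0 "", pcs.getD 1 "")

-- itertools.groupby on the direction; each run keeps only its last landmark
def runsB : List (String × String) → List (String × String)
  | [] => []
  | p :: ps =>
    (p.1, (((ps.takeWhile (fun q => q.1 == p.1)).map Prod.snd).getLast?).getD p.2)
      :: runsB (ps.dropWhile (fun q => q.1 == p.1))
termination_by l => l.length
decreasing_by
  calc (ps.dropWhile (fun q => q.1 == p.1)).length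
      ≤ ps.length := List.length_dropWhile_le _ _
    _ < (p :: ps).length := by simp

def genStepB (acc : String × String) (r : String × String) : String × String :=
  ((if acc.2 ≠ "" then acc.1 ++ acc.2 ++ " from there " else acc.1) ++ phraseB r.1, r.2)

def gen_path_alt (path : String) (src : String) (dest : String) : String :=
  ((runsB (((pySplit path "|").drop 1).map parsePairB)).foldl
    genStepB ("at " ++ src ++ " ", "")).1 ++ dest

-- ===== PRECONDITION & SPEC =====
-- Pre_ excludes exactly the inputs on which Python A raises ValueError: some '|'-part after
-- the first does not contain exactly one '>', so `direction, nxt = part.split('>')` cannot unpack.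
def Pre_gen_path (path : String) (src : String) (dest : String) : Prop :=
  ∀ part ∈ (pySplit path "|").drop 1, PySem.Str.count part ">" = 1
instance (path : String) (src : String) (dest : String) : Decidable (Pre_gen_path path src dest) := by
  unfold Pre_gen_path; infer_instance
def pvWitness_gen_path : String × String × String :=
  ("lobby|1>desk|1>stairs|0>door", "Entrance", "Room 5")

def Spec_gen_path (path : String) (src : String) (dest : String) (out : String) : Prop := out = gen_path_alt path src dest
instance (path : String) (src : String) (dest : String) (out : String) : Decidable (Spec_gen_path path src dest out) := by unfold Spec_gen_path; infer_instance

-- ===== CLAIM (what is proved, stated in full; the proofs are below) =====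
def Claim_equal_gen_path : Prop := ∀ (path : String) (src : String) (dest : String), Dom_gen_path path src dest → Pre_gen_path path src dest → Spec_gen_path path src dest (gen_path path src dest)

-- ===== LEMMAS AND PROOFS =====

-- a Python split never yields an empty list of pieces
theorem splitOn_go_ne_nil (sep : List Char) (fuel : Nat) :
    ∀ (l cur : List Char) (acc : List (List Char)), PySem.Chars.splitOn.go sep fuel l cur acc ≠ [] := by
  induction fuel with
  | zero => intro l cur acc; simp [PySem.Chars.splitOn.go]
  | succ n ih =>
    intro l cur acc
    cases l with
    | nil => simp [PySem.Chars.splitOn.go]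
    | cons c rest =>
      rw [PySem.Chars.splitOn.go]
      split
      · exact ih _ _ _
      · exact ih _ _ _

theorem pySplit_pipe_ne_nil (s : String) : pySplit s "|" ≠ [] := by
  unfold pySplit
  rw [PySem.Str.split?]
  rw [PySem.Chars.split?]
  have : (String.toList "|").isEmpty = false := by decide
  rw [this]
  simp only [Bool.false_eq_true, if_false, Option.map_some, Option.getD_some, ne_eq,
    List.map_eq_nil_iff]
  rw [PySem.Chars.splitOn]
  exact splitOn_go_ne_nil _ _ _ _ _

-- common recursive characterisation of the generated sentence from the parsed (direction,
-- landmark) pairs, given the current direction (none models A's initial -100) and last landmark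
def cRender : Option String → String → List (String × String) → String
  | _, _, [] => ""
  | c, l, p :: ps =>
    if some p.1 == c then cRender c p.2 ps
    else (if l ≠ "" then l ++ " from there " else "") ++ phraseB p.1 ++ cRender (some p.1) p.2 ps

def renderB : String → List (String × String) → String
  | _, [] => ""
  | l, r :: rs =>
    (if l ≠ "" then l ++ " from there " else "") ++ phraseB r.1 ++ renderB r.2 rs

-- B's fold accumulates exactly renderB
theorem foldB_eq (runs : List (String × String)) :
    ∀ g l, (runs.foldl genStepB (g, l)).1 = g ++ renderB l runs := by
  induction runs with
  | nil => intro g l; simp [renderB]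
  | cons r rs ih =>
    intro g l
    simp only [List.foldl_cons, genStepB, renderB, ih]
    split <;> simp [String.append_assoc]

theorem getLastD_cons {α : Type} (a x : α) (l : List α) :
    ((x :: l).getLast?).getD a = (l.getLast?).getD x := by
  cases l with
  | nil => simp
  | cons y ys =>
    rw [List.getLast?_cons_cons]
    obtain ⟨z, hz⟩ := Option.isSome_iff_exists.mp (by simp [List.getLast?_isSome] :
      ((y :: ys).getLast?).isSome = true)
    simp [hz]

-- within a run: equal-direction pairs only advance the landmark to the run's last one
theorem cRender_run (ps : List (String × String)) (d : String) :
    ∀ n, cRender (some d) n ps =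
      cRender (some d) ((((ps.takeWhile (fun q => q.1 == d)).map Prod.snd).getLast?).getD n)
        (ps.dropWhile (fun q => q.1 == d)) := by
  induction ps with
  | nil => intro n; simp [cRender]
  | cons q qs ih =>
    intro n
    by_cases h : q.1 = d
    · have hb : (q.1 == d) = true := by simp [h]
      simp only [List.takeWhile_cons, List.dropWhile_cons, hb, if_true,
        List.map_cons, cRender, h, beq_self_eq_true]
      rw [getLastD_cons, ih]
    · have hb : (q.1 == d) = false := by simp [h]
      simp [hb]

-- once the head direction differs, the stored direction no longer matters
theorem cRender_reset (ps : List (String × String)) (d l : String)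
    (h : ∀ q ∈ ps.head?, q.1 ≠ d) :
    cRender (some d) l ps = cRender none l ps := by
  cases ps with
  | nil => rfl
  | cons q qs =>
    have hne : q.1 ≠ d := h q rfl
    simp [cRender, hne]

theorem head_dropWhile_ne (ps : List (String × String)) (d : String) :
    ∀ q ∈ (ps.dropWhile (fun q => q.1 == d)).head?, q.1 ≠ d := by
  intro q hq
  have h := List.head?_dropWhile_not (fun q => q.1 == d) ps
  cases hh : (ps.dropWhile (fun q => q.1 == d)).head? with
  | none => rw [hh] at hq; exact absurd hq (by simp)
  | some r =>
    rw [hh] at hq h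
    simp only [Option.mem_def, Option.some.injEq] at hq
    subst hq
    simpa using h

-- B's run-by-run rendering equals the common characterisation
theorem renderB_runs (n : Nat) :
    ∀ pairs : List (String × String), pairs.length ≤ n →
      ∀ l, renderB l (runsB pairs) = cRender none l pairs := by
  induction n with
  | zero =>
    intro pairs hlen l
    have h0 : pairs = [] := List.eq_nil_of_length_eq_zero (Nat.le_zero.mp hlen)
    subst h0; simp [runsB, renderB, cRender]
  | succ m ih =>
    intro pairs hlen l
    cases pairs with
    | nil => simp [runsB, renderB, cRender]
    | cons p ps =>
      have hrest : (ps.dropWhile (fun q => q.1 == p.1)).length ≤ m := by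
        have h1 := List.length_dropWhile_le (fun q => q.1 == p.1) ps
        simp only [List.length_cons] at hlen
        omega
      rw [runsB]
      simp only [renderB, cRender, Option.some_beq_none, Bool.false_eq_true, if_false]
      rw [ih _ hrest, cRender_run ps p.1 p.2,
        cRender_reset _ _ _ (head_dropWhile_ne ps p.1)]

-- A's inline phrase chain appends phraseB
theorem chain_eq (g d : String) :
    (if d == "1" then g ++ "turn right and go until you see "
     else if d == "-1" then g ++ "turn left and go until you see "
     else if d == "0" then g ++ "go straight until you see "
     else if d == "2" then g ++ "go up the elevator until "
     else if d == "-2" then g ++ "go down the elevator until "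
     else if d == "3" || d == "-3" then g ++ "you will see "
     else g) = g ++ phraseB d := by
  unfold phraseB
  split_ifs <;> simp

-- A's loop over the tail parts equals the common characterisation
theorem foldA_tail (ps : List String) :
    ∀ g c l, ((ps.foldl genStepBodyA ((g, c, l) : String × Option String × String)).1)
      = g ++ cRender c l (ps.map parsePairB) := by
  induction ps with
  | nil => intro g c l; simp [cRender]
  | cons p rest ih =>
    intro g c l
    simp only [List.foldl_cons, List.map_cons]
    by_cases hc : c = some ((pySplit p ">").getD 0 "")
    · have hb : (c == some ((pySplit p ">").getD 0 "")) = true := by simp [hc]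
      have hb' : (some (parsePairB p).1 == c) = true := by simp [parsePairB, hc]
      simp only [genStepBodyA, hb, if_true, cRender, hb']
      rw [ih]
      simp [parsePairB, hc]
    · have hb : (c == some ((pySplit p ">").getD 0 "")) = false := by simpa using hc
      have hb' : (some (parsePairB p).1 == c) = false := by
        simp [parsePairB]
        intro hcontra
        exact hc hcontra.symm
      simp only [genStepBodyA, hb, Bool.false_eq_true, if_false, cRender, hb']
      rw [chain_eq, ih]
      simp only [parsePairB]
      by_cases hl : l = "" <;> simp [hl, String.append_assoc]

theorem gen_path_eq_alt (path src dest : String) :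
    gen_path path src dest = gen_path_alt path src dest := by
  unfold gen_path gen_path_alt
  cases hp : pySplit path "|" with
  | nil => exact absurd hp (pySplit_pipe_ne_nil path)
  | cons p0 rest =>
    have hlen : (0 : Int) < ((p0 :: rest).length : Int) := by
      simp only [List.length_cons]
      positivity
    rw [PySem.List.pyRange_one_cons hlen]
    simp only [List.foldl_cons]
    have h0 : genStepA src (p0 :: rest) ("at ", none, "") 0 = ("at " ++ src ++ " ", none, "") := by
      simp [genStepA]
    rw [h0]
    have hcg : (PySem.List.pyRange (0 + 1) ((p0 :: rest).length : Int)).foldl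
        (genStepA src (p0 :: rest)) ("at " ++ src ++ " ", none, "")
        = (PySem.List.pyRange (0 + 1) ((p0 :: rest).length : Int)).foldl
          (fun acc j => genStepBodyA acc (PySem.List.pyGetD (p0 :: rest) j ""))
          ("at " ++ src ++ " ", none, "") := by
      apply PySem.List.foldl_congr_mem
      intro acc x hx
      have hxr := PySem.List.mem_pyRange_one.mp hx
      have hxne : (x == 0) = false := by
        simp only [beq_eq_false_iff_ne, ne_eq]
        omega
      simp [genStepA, hxne]
    rw [hcg]
    have h1 : ((0 : Int) + 1) = (1 : Int) := by norm_num
    rw [h1, PySem.List.foldl_pyRange_pyGetD' (p0 :: rest) "" genStepBodyA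
      ("at " ++ src ++ " ", none, "") (by norm_num)]
    simp only [Int.toNat_one, List.drop_succ_cons, List.drop_zero]
    rw [foldA_tail, foldB_eq, renderB_runs (rest.map parsePairB).length _ (le_refl _)]

-- ===== VERDICT (by name: the statement is the Claim_ definition above) =====
theorem gen_path_spec : Claim_equal_gen_path := by
  intro path src dest _ _
  unfold Spec_gen_path
  exact gen_path_eq_alt path src dest
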